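-- pv_equiv track=rewrite | github.com/m-crown/AlphaCognate | alphacognate_pipeline/bin/alphacognate_transplant.py | check_domain_profile
-- ===== SOURCE A (Python) =====
-- def check_domain_profile(af_domain_profiles, residues_in_contact=0, procoggraph_profile=0):
--     domain_range_dict = {}
--     if af_domain_profiles == ['']: #sometimes the uniprot id does not have a domain mapping in ted or cath alphafold
--         return "", "", False
--
--     for i, domain_profile in enumerate(af_domain_profiles):
--         domain, res = domain_profile.split(":")
--         segments = res.split("_")
--         ranges = []
--         for segment in segments:
--             res_start, res_end = segment.split("-")
--             ranges.append((int(res_start), int(res_end)))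
--         domain_range_dict[f"{domain}_{i}"] = ranges
--
--     residue_mappings = {domain: [] for domain in domain_range_dict}
--     residue_mappings.setdefault('no-domain_-1', [])
--
--     for res in residues_in_contact:
--         found = False
--         for domain, ranges in domain_range_dict.items():
--             for start, end in ranges:
--                 if start <= res <= end:
--                     residue_mappings[domain].append(res)
--                     found = True
--                     break
--             if found:
--                 break
--         if not found:
--             residue_mappings['no-domain_-1'].append(res)
--
--     interacting_domains = [(domain.split("_")[0], domain.split("_")[1], len(residues)) for domain, residues in residue_mappings.items() if residues and domain != 'no-domain_-1']
--     procoggraph_map = sorted([domain for domain, idx, count in interacting_domains]) == sorted(procoggraph_profile)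
--
--     interacting_domains = ";".join([":".join([str(val) for val in tup]) for tup in interacting_domains])
--     residue_mappings = ";".join([":".join([key, ",".join(map(str, value))]) for key, value in residue_mappings.items() if value])
--
--     return residue_mappings, interacting_domains, procoggraph_map
-- ===== SOURCE B (Python) =====
-- def check_domain_profile(af_domain_profiles, residues_in_contact=0, procoggraph_profile=0):
--     if af_domain_profiles == ['']:
--         return "", "", False
--     entries = []
--     for i, domain_profile in enumerate(af_domain_profiles):
--         domain, res = domain_profile.split(":")
--         ranges = []
--         for segment in res.split("_"):
--             res_start, res_end = segment.split("-")
--             ranges.append((int(res_start), int(res_end)))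
--         entries.append((f"{domain}_{i}", ranges))
--
--     def hits(r, ranges):
--         return any(start <= r <= end for start, end in ranges)
--
--     # domain-major: for each domain (in order) take the residues it is the first to cover
--     groups = [(key, [r for r in residues_in_contact
--                      if hits(r, ranges) and not any(hits(r, rgs) for _, rgs in entries[:j])])
--               for j, (key, ranges) in enumerate(entries)]
--     unassigned = [r for r in residues_in_contact
--                   if not any(hits(r, rgs) for _, rgs in entries)]
--
--     interacting = [(key.split("_")[0], key.split("_")[1], len(g)) for key, g in groups if g]
--     procoggraph_map = sorted(name for name, _, _ in interacting) == sorted(procoggraph_profile)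
--
--     parts = [":".join([key, ",".join(map(str, g))]) for key, g in groups if g]
--     if unassigned:
--         parts.append(":".join(["no-domain_-1", ",".join(map(str, unassigned))]))
--
--     return (";".join(parts),
--             ";".join(":".join(str(v) for v in t) for t in interacting),
--             procoggraph_map)
-- ===== Notes on version B (the rewrite author's own statement) =====
-- stated objective: alternative
-- what changed: Replaces the residue-major scan that mutates a dict of per-domain lists (first matching domain wins via break) by a domain-major decomposition: for each domain a comprehension collects the residues it is the first to cover (checking that no earlier domain's ranges hit them), with unassigned residues collected separately at the end.
import Mathlib
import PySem

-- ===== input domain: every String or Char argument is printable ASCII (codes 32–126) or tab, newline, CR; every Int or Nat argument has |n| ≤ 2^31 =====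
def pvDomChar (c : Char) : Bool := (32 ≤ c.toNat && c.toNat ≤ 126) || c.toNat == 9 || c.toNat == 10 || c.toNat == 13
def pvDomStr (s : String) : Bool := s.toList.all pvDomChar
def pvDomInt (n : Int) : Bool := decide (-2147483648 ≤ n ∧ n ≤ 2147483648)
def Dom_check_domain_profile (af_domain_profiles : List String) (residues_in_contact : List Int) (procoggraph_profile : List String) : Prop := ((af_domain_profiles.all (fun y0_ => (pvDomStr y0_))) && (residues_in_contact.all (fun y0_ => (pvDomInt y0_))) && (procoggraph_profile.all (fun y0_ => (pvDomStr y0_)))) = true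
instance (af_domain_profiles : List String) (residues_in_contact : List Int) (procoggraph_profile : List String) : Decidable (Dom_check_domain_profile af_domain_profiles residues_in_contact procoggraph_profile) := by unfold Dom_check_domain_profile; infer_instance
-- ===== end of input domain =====

-- B is an 'alternative' re-implementation: domain-major comprehensions (each domain collects the
-- residues it is the first to cover) instead of A's residue-major first-match scan mutating a dict.
-- Both Pythons share the identical profile-parsing code, so its port below is a shared helper.

-- ===== PORT A =====
-- shared parsing helpers (this code is identical in both Pythons):
-- 'res_start, res_end = segment.split("-"); (int(res_start), int(res_end))'
def pvParseSeg (seg : String) : Option (Int × Int) :=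
  match PySem.Str.split? seg "-" with
  | some [a, b] =>
    match PySem.Int.ofStr? a, PySem.Int.ofStr? b with
    | some x, some y => some (x, y)
    | _, _ => none
  | _ => none

-- the inner 'for segment in res.split("_"): ranges.append(...)' loop (none = some int() / unpack ValueError)
def pvParseRanges (res : String) : Option (List (Int × Int)) :=
  ((PySem.Str.split? res "_").getD []).foldl
    (fun acc seg =>
      match acc, pvParseSeg seg with
      | some rs, some p => some (rs ++ [p])
      | _, _ => none)
    (some [])

-- one iteration of the parsing loop: 'domain, res = domain_profile.split(":")' + ranges + key f"{domain}_{i}"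
def pvParseProfile (i : Int) (dp : String) : Option (String × List (Int × Int)) :=
  match PySem.Str.split? dp ":" with
  | some [domain, res] =>
    match pvParseRanges res with
    | some rs => some (String.ofList (domain.toList ++ '_' :: PySem.Int.toChars i), rs)
    | none => none
  | _ => none

-- the whole 'for i, domain_profile in enumerate(af_domain_profiles)' parsing loop
def pvParseAll (af : List String) : Option (List (String × List (Int × Int))) :=
  (PySem.List.enumerate af).foldl
    (fun acc p =>
      match acc, pvParseProfile p.1 p.2 with
      | some es, some e => some (es ++ [e])
      | _, _ => none)
    (some [])

def check_domain_profile (af_domain_profiles : List String) (residues_in_contact : List Int) (procoggraph_profile : List String) : String × String × Bool :=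
  if af_domain_profiles = [""] then ("", "", false) else
  match pvParseAll af_domain_profiles with
  | none => ("", "", false)   -- Python raises here (excluded by Pre_)
  | some entries =>
    -- domain_range_dict (a dict: insertion order, overwrite)
    let drd : PySem.Dict String (List (Int × Int)) :=
      entries.foldl (fun d e => d.insert e.1 e.2) PySem.Dict.empty
    -- residue_mappings = {domain: [] for domain in domain_range_dict}; setdefault('no-domain_-1', [])
    let rm0 : PySem.Dict String (List Int) :=
      (drd.keys.foldl (fun d k => d.insert k []) PySem.Dict.empty).setdefault "no-domain_-1" []
    -- residue loop: first domain (dict order) with a range containing res wins, else no-domain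
    let rm : PySem.Dict String (List Int) :=
      residues_in_contact.foldl
        (fun m r =>
          match drd.items.find? (fun kv => kv.2.any (fun se => decide (se.1 ≤ r ∧ r ≤ se.2))) with
          | some kv => m.modify kv.1 [] (· ++ [r])
          | none => m.modify "no-domain_-1" [] (· ++ [r]))
        rm0
    let interacting : List (String × String × Int) :=
      (rm.items.filter (fun kv => !kv.2.isEmpty && !(kv.1 == "no-domain_-1"))).map
        (fun kv => (PySem.List.pyGetD (PySem.Str.split? kv.1 "_" |>.getD []) 0 "",
                    PySem.List.pyGetD (PySem.Str.split? kv.1 "_" |>.getD []) 1 "",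
                    (kv.2.length : Int)))
    let procoggraph_map : Bool :=
      PySem.List.sorted (interacting.map (fun t => t.1)) (fun x => x) ==
        PySem.List.sorted procoggraph_profile (fun x => x)
    let interStr : String :=
      PySem.Str.join ";" (interacting.map (fun t => PySem.Str.join ":" [t.1, t.2.1, PySem.Int.toStr t.2.2]))
    let rmStr : String :=
      PySem.Str.join ";" ((rm.items.filter (fun kv => !kv.2.isEmpty)).map
        (fun kv => PySem.Str.join ":" [kv.1, PySem.Str.join "," (kv.2.map PySem.Int.toStr)]))
    (rmStr, interStr, procoggraph_map)

-- ===== PORT B =====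
def pvHits (r : Int) (ranges : List (Int × Int)) : Bool :=
  ranges.any (fun se => decide (se.1 ≤ r ∧ r ≤ se.2))

def check_domain_profile_alt (af_domain_profiles : List String) (residues_in_contact : List Int) (procoggraph_profile : List String) : String × String × Bool :=
  if af_domain_profiles = [""] then ("", "", false) else
  match pvParseAll af_domain_profiles with
  | none => ("", "", false)   -- Python raises here (excluded by Pre_)
  | some entries =>
    -- domain-major: each domain takes the residues it is the first to cover
    let groups : List (String × List Int) :=
      (PySem.List.enumerate entries).map
        (fun je => (je.2.1, residues_in_contact.filter
          (fun r => pvHits r je.2.2 &&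
            !((PySem.List.slice entries none (some je.1)).any (fun e => pvHits r e.2)))))
    let unassigned : List Int :=
      residues_in_contact.filter (fun r => !(entries.any (fun e => pvHits r e.2)))
    let interacting : List (String × String × Int) :=
      (groups.filter (fun g => !g.2.isEmpty)).map
        (fun g => (PySem.List.pyGetD (PySem.Str.split? g.1 "_" |>.getD []) 0 "",
                   PySem.List.pyGetD (PySem.Str.split? g.1 "_" |>.getD []) 1 "",
                   (g.2.length : Int)))
    let procoggraph_map : Bool :=
      PySem.List.sorted (interacting.map (fun t => t.1)) (fun x => x) ==
        PySem.List.sorted procoggraph_profile (fun x => x)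
    let parts : List String :=
      (groups.filter (fun g => !g.2.isEmpty)).map
        (fun g => PySem.Str.join ":" [g.1, PySem.Str.join "," (g.2.map PySem.Int.toStr)])
    let parts : List String :=
      if unassigned.isEmpty then parts
      else parts ++ [PySem.Str.join ":" ["no-domain_-1", PySem.Str.join "," (unassigned.map PySem.Int.toStr)]]
    (PySem.Str.join ";" parts,
     PySem.Str.join ";" (interacting.map (fun t => PySem.Str.join ":" [t.1, t.2.1, PySem.Int.toStr t.2.2])),
     procoggraph_map)

-- ===== PRECONDITION & SPEC =====
-- one profile is well-formed: 'name:int-int[_int-int...]' (as accepted by Python's split/int)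
def pvWF (dp : String) : Bool :=
  match PySem.Str.split? dp ":" with
  | some [_, res] =>
    ((PySem.Str.split? res "_").getD []).all (fun seg =>
      match PySem.Str.split? seg "-" with
      | some [a, b] => (PySem.Int.ofStr? a).isSome && (PySem.Int.ofStr? b).isSome
      | _ => false)
  | _ => false

-- Pre_ excludes exactly the inputs where Python A raises ValueError while parsing a profile
-- (a profile not of the shape name:int-int[_int-int...]); the early-return input [''] stays inside.
def Pre_check_domain_profile (af_domain_profiles : List String) (residues_in_contact : List Int) (procoggraph_profile : List String) : Prop :=
  af_domain_profiles = [""] ∨ ∀ dp ∈ af_domain_profiles, pvWF dp = true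
instance (af_domain_profiles : List String) (residues_in_contact : List Int) (procoggraph_profile : List String) : Decidable (Pre_check_domain_profile af_domain_profiles residues_in_contact procoggraph_profile) := by unfold Pre_check_domain_profile; infer_instance

def pvWitness_check_domain_profile : List String × List Int × List String :=
  (["A:1-10_20-30", "B:5-25"], [(3 : Int), 22, 99, 3], ["A", "C"])

def Spec_check_domain_profile (af_domain_profiles : List String) (residues_in_contact : List Int) (procoggraph_profile : List String) (out : String × String × Bool) : Prop := out = check_domain_profile_alt af_domain_profiles residues_in_contact procoggraph_profile
instance (af_domain_profiles : List String) (residues_in_contact : List Int) (procoggraph_profile : List String) (out : String × String × Bool) : Decidable (Spec_check_domain_profile af_domain_profiles residues_in_contact procoggraph_profile out) := by unfold Spec_check_domain_profile; infer_instance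

-- ===== CLAIM (what is proved, stated in full; the proofs are below) =====
def Claim_equal_check_domain_profile : Prop := ∀ (af_domain_profiles : List String) (residues_in_contact : List Int) (procoggraph_profile : List String), Dom_check_domain_profile af_domain_profiles residues_in_contact procoggraph_profile → Pre_check_domain_profile af_domain_profiles residues_in_contact procoggraph_profile → Spec_check_domain_profile af_domain_profiles residues_in_contact procoggraph_profile (check_domain_profile af_domain_profiles residues_in_contact procoggraph_profile)

-- ===== LEMMAS AND PROOFS =====

-- pvOkey: the dict key A's residue loop appends r to (first matching domain, else the sentinel)
def pvOkey (entries : List (String × List (Int × Int))) (r : Int) : String :=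
  match entries.find? (fun kv => pvHits r kv.2) with
  | some kv => kv.1
  | none => "no-domain_-1"

-- proof-side model of Nat.toDigits 10
def pvTd (n : Nat) : List Char :=
  if _h : n < 10 then [Nat.digitChar n] else pvTd (n / 10) ++ [Nat.digitChar (n % 10)]
  decreasing_by exact Nat.div_lt_self (by omega) (by omega)

theorem pvToDigitsCore_eq : ∀ (f n : Nat) (ds : List Char), n < f →
    Nat.toDigitsCore 10 f n ds = pvTd n ++ ds := by
  intro f
  induction f with
  | zero => intro n ds h; omega
  | succ f ih =>
    intro n ds h
    rw [Nat.toDigitsCore]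
    by_cases h10 : n / 10 = 0
    · have hn : n < 10 := by omega
      rw [pvTd]
      simp [h10, hn, Nat.mod_eq_of_lt hn]
    · have hn : ¬ n < 10 := by omega
      rw [if_neg h10, ih (n / 10) _ (by omega)]
      conv_rhs => rw [pvTd]
      simp [hn]

theorem pvToDigits_eq (n : Nat) : Nat.toDigits 10 n = pvTd n := by
  have := pvToDigitsCore_eq (n + 1) n [] (by omega)
  simpa [Nat.toDigits] using this

theorem pvDigitChar_isDigit (m : Nat) (h : m < 10) : (Nat.digitChar m).isDigit = true := by
  interval_cases m <;> decide

theorem pvDigitChar_inj (m n : Nat) (hm : m < 10) (hn : n < 10)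
    (h : Nat.digitChar m = Nat.digitChar n) : m = n := by
  have h1 : (Nat.digitChar m).toNat = m + 48 := by interval_cases m <;> decide
  have h2 : (Nat.digitChar n).toNat = n + 48 := by interval_cases n <;> decide
  rw [h, h2] at h1; omega

theorem pvTd_digits (n : Nat) : ∀ c ∈ pvTd n, c.isDigit = true := by
  induction n using pvTd.induct with
  | case1 n h => rw [pvTd]; simp [h, pvDigitChar_isDigit n h]
  | case2 n h ih =>
    rw [pvTd]; simp only [h]
    intro c hc
    rcases List.mem_append.mp hc with h1 | h1
    · exact ih c h1
    · simp at h1; subst h1; exact pvDigitChar_isDigit _ (Nat.mod_lt _ (by omega))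

theorem pvTd_ne_nil (n : Nat) : pvTd n ≠ [] := by
  rw [pvTd]; split <;> simp

theorem pvTd_small {n : Nat} (h : n < 10) : pvTd n = [Nat.digitChar n] := by
  rw [pvTd]; simp [h]

theorem pvTd_big {n : Nat} (h : ¬ n < 10) : pvTd n = pvTd (n / 10) ++ [Nat.digitChar (n % 10)] := by
  conv_lhs => rw [pvTd]
  simp [h]

theorem pvTd_inj : ∀ m n : Nat, pvTd m = pvTd n → m = n := by
  intro m
  induction m using pvTd.induct with
  | case1 m hm =>
    intro n h
    by_cases hn : n < 10
    · rw [pvTd_small hm, pvTd_small hn] at h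
      simp at h
      exact pvDigitChar_inj _ _ hm hn h
    · exfalso
      rw [pvTd_small hm, pvTd_big hn] at h
      have hlen := congrArg List.length h
      cases h' : pvTd (n / 10) with
      | nil => exact pvTd_ne_nil _ h'
      | cons a l => rw [h'] at hlen; simp at hlen
  | case2 m hm ih =>
    intro n h
    by_cases hn : n < 10
    · exfalso
      rw [pvTd_big hm, pvTd_small hn] at h
      have hlen := congrArg List.length h
      cases h' : pvTd (m / 10) with
      | nil => exact pvTd_ne_nil _ h'
      | cons a l => rw [h'] at hlen; simp at hlen
    · rw [pvTd_big hm, pvTd_big hn] at h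
      obtain ⟨h1, h2⟩ := List.append_inj' h (by simp)
      simp at h2
      have e1 := ih _ h1
      have e2 := pvDigitChar_inj _ _ (Nat.mod_lt _ (by omega)) (Nat.mod_lt _ (by omega)) h2
      omega

theorem pvToChars_digits (i : Int) (h : 0 ≤ i) : ∀ c ∈ PySem.Int.toChars i, c.isDigit = true := by
  unfold PySem.Int.toChars
  rw [if_neg (by omega), pvToDigits_eq]
  exact pvTd_digits _

theorem pvToChars_inj (i j : Int) (hi : 0 ≤ i) (hj : 0 ≤ j)
    (h : PySem.Int.toChars i = PySem.Int.toChars j) : i = j := by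
  unfold PySem.Int.toChars at h
  rw [if_neg (by omega), if_neg (by omega), pvToDigits_eq, pvToDigits_eq] at h
  have := pvTd_inj _ _ h
  omega

-- splitting a list at a separator char absent from both tails
theorem pvUnderscoreSplit : ∀ (d1 : List Char) {d2 t1 t2 : List Char}, '_' ∉ t1 → '_' ∉ t2 →
    d1 ++ '_' :: t1 = d2 ++ '_' :: t2 → d1 = d2 ∧ t1 = t2 := by
  intro d1
  induction d1 with
  | nil =>
    intro d2 t1 t2 h1 h2 h
    cases d2 with
    | nil => simpa using h
    | cons c d2' =>
      exfalso
      simp at h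
      obtain ⟨hc, ht⟩ := h
      exact h1 (ht ▸ List.mem_append_right _ (by simp))
  | cons c d1' ih =>
    intro d2 t1 t2 h1 h2 h
    cases d2 with
    | nil =>
      exfalso
      simp at h
      obtain ⟨hc, ht⟩ := h
      exact h2 (ht ▸ List.mem_append_right _ (by simp))
    | cons c' d2' =>
      simp at h
      obtain ⟨hc, ht⟩ := h
      obtain ⟨e1, e2⟩ := ih h1 h2 ht
      exact ⟨by simp [hc, e1], e2⟩

theorem pvKey_inj {d1 d2 : List Char} {i j : Int} (hi : 0 ≤ i) (hj : 0 ≤ j)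
    (h : String.ofList (d1 ++ '_' :: PySem.Int.toChars i) = String.ofList (d2 ++ '_' :: PySem.Int.toChars j)) :
    i = j := by
  have h' : d1 ++ '_' :: PySem.Int.toChars i = d2 ++ '_' :: PySem.Int.toChars j := by
    have := congrArg String.toList h
    simpa using this
  have hu := pvUnderscoreSplit d1
    (t1 := PySem.Int.toChars i) (t2 := PySem.Int.toChars j)
    (fun hm => by simpa using pvToChars_digits i hi _ hm)
    (fun hm => by simpa using pvToChars_digits j hj _ hm) h'
  exact pvToChars_inj i j hi hj hu.2

theorem pvKey_ne_sent {d : List Char} {i : Int} (hi : 0 ≤ i) :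
    String.ofList (d ++ '_' :: PySem.Int.toChars i) ≠ "no-domain_-1" := by
  intro h
  have h' : d ++ '_' :: PySem.Int.toChars i = ['n','o','-','d','o','m','a','i','n'] ++ '_' :: ['-','1'] := by
    have := congrArg String.toList h
    simp at this
    rw [this]; decide
  have hu := pvUnderscoreSplit d
    (t1 := PySem.Int.toChars i) (t2 := ['-','1'])
    (fun hm => by simpa using pvToChars_digits i hi _ hm)
    (by decide) h'
  have := pvToChars_digits i hi '-' (hu.2 ▸ (by simp))
  simp at this


theorem pvParseRanges_fold_some (l : List String) :
    ∀ acc, (∀ s ∈ l, (pvParseSeg s).isSome) →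
    ∃ rs, l.foldl (fun acc seg =>
      match acc, pvParseSeg seg with
      | some rs, some p => some (rs ++ [p])
      | _, _ => none) (some acc) = some rs := by
  induction l with
  | nil => intro acc _; exact ⟨acc, rfl⟩
  | cons s t ih =>
    intro acc h
    have hs := h s (by simp)
    obtain ⟨p, hp⟩ := Option.isSome_iff_exists.mp hs
    simp only [List.foldl_cons, hp]
    exact ih _ (fun x hx => h x (by simp [hx]))

theorem pvParseProfile_shape (i : Int) (dp : String) (h : pvWF dp = true) :
    ∃ dom rs, pvParseProfile i dp = some (String.ofList (dom ++ '_' :: PySem.Int.toChars i), rs) := by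
  unfold pvWF at h
  unfold pvParseProfile
  cases hsp : PySem.Str.split? dp ":" with
  | none => rw [hsp] at h; simp at h
  | some parts =>
    rw [hsp] at h
    match parts with
    | [] => simp at h
    | [_] => simp at h
    | _ :: _ :: _ :: _ => simp at h
    | [domain, res] =>
      have hsegs : ∀ s ∈ (PySem.Str.split? res "_").getD [], (pvParseSeg s).isSome := by
        intro s hs
        have := List.all_eq_true.mp h s hs
        unfold pvParseSeg
        cases h2 : PySem.Str.split? s "-" with
        | none => rw [h2] at this; simp at this
        | some ps =>
          rw [h2] at this
          match ps with
          | [] => simp at this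
          | [_] => simp at this
          | _ :: _ :: _ :: _ => simp at this
          | [a, b] =>
            simp only [Bool.and_eq_true, Option.isSome_iff_exists] at this
            obtain ⟨⟨x, hx⟩, ⟨y, hy⟩⟩ := this
            simp [hx, hy]
      obtain ⟨rs, hrs⟩ := pvParseRanges_fold_some _ [] hsegs
      have hpr : pvParseRanges res = some rs := hrs
      exact ⟨domain.toList, rs, by simp [hpr]⟩

theorem pvParseAll_fold_some (l : List (Int × String)) :
    ∀ acc, (∀ p ∈ l, (pvParseProfile p.1 p.2).isSome) →
    l.foldl (fun acc p =>
      match acc, pvParseProfile p.1 p.2 with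
      | some es, some e => some (es ++ [e])
      | _, _ => none) (some acc)
      = some (acc ++ l.map (fun p => (pvParseProfile p.1 p.2).getD ("", []))) := by
  induction l with
  | nil => intro acc _; simp
  | cons p t ih =>
    intro acc h
    obtain ⟨e, he⟩ := Option.isSome_iff_exists.mp (h p (by simp))
    simp only [List.foldl_cons, he, List.map_cons]
    rw [ih _ (fun x hx => h x (by simp [hx]))]
    simp

theorem pvParseAll_eq (af : List String) (h : ∀ dp ∈ af, pvWF dp = true) :
    pvParseAll af = some ((PySem.List.enumerate af).map
      (fun p => (pvParseProfile p.1 p.2).getD ("", []))) := by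
  unfold pvParseAll
  rw [pvParseAll_fold_some _ []]
  · simp
  · intro p hp
    obtain ⟨k, hk, hpk⟩ := (PySem.List.mem_enumerate_iff af 0 p).mp hp
    have := pvParseProfile_shape p.1 p.2 (h p.2 (by rw [hpk]; simp))
    obtain ⟨dom, rs, hd⟩ := this
    simp [hd]

-- the j-th entry: key shape
theorem pvEntries_key_shape (af : List String) (h : ∀ dp ∈ af, pvWF dp = true)
    (entries : List (String × List (Int × Int)))
    (he : pvParseAll af = some entries) :
    entries.length = af.length ∧
    ∀ j (hj : j < entries.length), ∃ dom, entries[j].1 = String.ofList (dom ++ '_' :: PySem.Int.toChars (j : Int)) := by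
  rw [pvParseAll_eq af h] at he
  have he' : entries = (PySem.List.enumerate af).map (fun p => (pvParseProfile p.1 p.2).getD ("", [])) := by
    exact (Option.some.injEq _ _ ▸ he.symm : _)
  subst he'
  constructor
  · simp [PySem.List.length_enumerate]
  · intro j hj
    simp only [List.length_map, PySem.List.length_enumerate] at hj
    have hjl : j < (PySem.List.enumerate af 0).length := by simp [PySem.List.length_enumerate, hj]
    rw [List.getElem_map]
    rw [PySem.List.getElem_enumerate af 0 j hjl]
    obtain ⟨dom, rs, hd⟩ := pvParseProfile_shape ((0 : Int) + (j : Int)) af[j] (h _ (by simp))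
    refine ⟨dom, ?_⟩
    simp only [hd, Option.getD_some]
    norm_num

-- ==== the residue-assignment characterization ====
theorem pvTakeAny (j : Nat) {α : Type} (l : List α) (p : α → Bool) :
    (l.take j).any p = true ↔ ∃ k, ∃ _h : k < l.length, k < j ∧ p l[k] = true := by
  simp only [List.any_eq_true]
  constructor
  · rintro ⟨x, hx, hp⟩
    obtain ⟨k, hk, he⟩ := List.mem_iff_getElem.mp hx
    simp only [List.length_take] at hk
    refine ⟨k, by omega, by omega, ?_⟩
    rw [List.getElem_take] at he
    rw [he]; exact hp
  · rintro ⟨k, h1, h2, hp⟩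
    exact ⟨l[k], by rw [List.mem_take_iff_getElem]; exact ⟨k, by simp; omega, rfl⟩, hp⟩

theorem pvOkey_sent (entries : List (String × List (Int × Int))) (r : Int)
    (hsent : "no-domain_-1" ∉ entries.map (fun e => e.1)) :
    (pvOkey entries r == "no-domain_-1") = !(entries.any (fun kv => pvHits r kv.2)) := by
  unfold pvOkey
  cases hf : entries.find? (fun kv => pvHits r kv.2) with
  | none =>
    have hnone := List.find?_eq_none.mp hf
    have h1 : entries.any (fun kv => pvHits r kv.2) = false := by
      rw [← Bool.not_eq_true, List.any_eq_true]
      rintro ⟨x, hx, hp⟩; exact hnone x hx hp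
    simp [h1]
  | some kv =>
    have hm := List.mem_of_find?_eq_some hf
    have hp := List.find?_some hf
    have hne : kv.1 ≠ "no-domain_-1" := fun he => hsent (he ▸ List.mem_map_of_mem hm)
    have : entries.any (fun kv => pvHits r kv.2) = true := List.any_eq_true.mpr ⟨kv, hm, hp⟩
    simp [this, beq_eq_false_iff_ne, hne]

theorem pvOkey_key (entries : List (String × List (Int × Int))) (r : Int) (j : Nat)
    (hj : j < entries.length)
    (hnodup : (entries.map (fun e => e.1)).Nodup)
    (hsent : "no-domain_-1" ∉ entries.map (fun e => e.1)) :
    (pvOkey entries r == entries[j].1) =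
      (pvHits r entries[j].2 && !((entries.take j).any (fun e => pvHits r e.2))) := by
  have hfst : ∀ i1 i2 (h1 : i1 < entries.length) (h2 : i2 < entries.length),
      i1 ≠ i2 → entries[i1].1 ≠ entries[i2].1 := by
    intro i1 i2 h1 h2 hne
    have := List.pairwise_iff_getElem.mp hnodup
    rcases Nat.lt_or_ge i1 i2 with h | h
    · have := this i1 i2 (by simpa using h1) (by simpa using h2) h
      simpa using this
    · have hlt : i2 < i1 := by omega
      have := this i2 i1 (by simpa using h2) (by simpa using h1) hlt
      simp at this
      exact fun he => this he.symm
  unfold pvOkey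
  cases hf : entries.find? (fun kv => pvHits r kv.2) with
  | none =>
    have hnone := List.find?_eq_none.mp hf
    have hpj : pvHits r entries[j].2 = false := by
      have := hnone entries[j] (by simp)
      simpa using this
    rw [hpj]
    simp only [Bool.false_and]
    rw [beq_eq_false_iff_ne]
    intro he
    exact hsent (by rw [he]; exact List.mem_map_of_mem (List.getElem_mem hj))
  | some kv =>
    obtain ⟨hpkv, i0, hi0, hgi, hmin⟩ := List.find?_eq_some_iff_getElem.mp hf
    by_cases hij : i0 = j
    · subst hij
      have h2 : (entries.take i0).any (fun e => pvHits r e.2) = false := by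
        rw [← Bool.not_eq_true, pvTakeAny]
        rintro ⟨k, hk, hki, hp⟩
        have := hmin k hki
        simp [hp] at this
      rw [hgi]
      simp [hpkv, h2]
    · have hne : kv.1 ≠ entries[j].1 := by
        rw [← hgi]
        exact hfst i0 j hi0 hj hij
      rw [(beq_eq_false_iff_ne).mpr hne]
      rcases Nat.lt_or_ge i0 j with h | h
      · have : (entries.take j).any (fun e => pvHits r e.2) = true := by
          rw [pvTakeAny]
          exact ⟨i0, hi0, h, by rw [hgi]; exact hpkv⟩
        simp [this]
      · have hj0 : j < i0 := by omega
        have := hmin j hj0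
        simp at this
        simp [this]

theorem pvSetUpdate_of_mem (xs : List String) :
    ∀ (s : PySem.Set String), (∀ x ∈ xs, x ∈ s) → PySem.Set.update s xs = s := by
  induction xs with
  | nil => intro s _; rfl
  | cons x t ih =>
    intro s h
    show List.foldl PySem.Set.add (PySem.Set.add s x) t = s
    rw [PySem.Set.add_of_mem (h x (by simp))]
    exact ih s (fun y hy => h y (by simp [hy]))

-- ==== characterization of A's residue_mappings dict ====
theorem pvRmItems (entries : List (String × List (Int × Int))) (residues : List Int)
    (hnodup : (entries.map (fun e => e.1)).Nodup)
    (hsent : "no-domain_-1" ∉ entries.map (fun e => e.1)) :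
    (residues.foldl
      (fun m r =>
        match (entries.foldl (fun d e => d.insert e.1 e.2) PySem.Dict.empty).items.find?
            (fun kv => kv.2.any (fun se => decide (se.1 ≤ r ∧ r ≤ se.2))) with
        | some kv => m.modify kv.1 [] (· ++ [r])
        | none => m.modify "no-domain_-1" [] (· ++ [r]))
      (((entries.foldl (fun d e => d.insert e.1 e.2) PySem.Dict.empty).keys.foldl
          (fun d k => d.insert k ([] : List Int)) PySem.Dict.empty).setdefault "no-domain_-1" [])).items
    = (entries.map (fun e => e.1)).map
        (fun k => (k, residues.filter (fun r => pvOkey entries r == k)))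
      ++ [("no-domain_-1", residues.filter (fun r => pvOkey entries r == "no-domain_-1"))] := by
  have hdrd_items : (entries.foldl (fun d e => d.insert e.1 e.2) PySem.Dict.empty).items = entries := by
    have h := PySem.Dict.items_foldl_insert_fresh entries (fun e => e.1) (fun e => e.2)
      PySem.Dict.empty (fun a _ => by simp) hnodup
    simpa using h
  have hdrd_keys : (entries.foldl (fun d e => d.insert e.1 e.2) PySem.Dict.empty).keys
      = entries.map (fun e => e.1) := by
    simp only [PySem.Dict.keys, hdrd_items]
  rw [hdrd_keys]
  set ks := entries.map (fun e => e.1) with hks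
  -- rm0
  have h0items : (ks.foldl (fun d k => d.insert k ([] : List Int)) PySem.Dict.empty).items
      = ks.map (fun k => (k, ([] : List Int))) := by
    have h := PySem.Dict.items_foldl_insert_fresh ks (fun k => k) (fun _ => ([] : List Int))
      PySem.Dict.empty (fun a _ => by simp) (by simpa using hnodup)
    simpa using h
  have h0keys : (ks.foldl (fun d k => d.insert k ([] : List Int)) PySem.Dict.empty).keys = ks := by
    simp only [PySem.Dict.keys, h0items, List.map_map]
    simp [Function.comp_def]
  have h0contains : (ks.foldl (fun d k => d.insert k ([] : List Int)) PySem.Dict.empty).contains "no-domain_-1" = false := by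
    rw [Bool.eq_false_iff]
    intro hc
    exact hsent (h0keys ▸ (PySem.Dict.contains_iff_mem_keys _ _).mp hc)
  set rm1 := ((ks.foldl (fun d k => d.insert k ([] : List Int)) PySem.Dict.empty).setdefault "no-domain_-1" []) with hrm1
  have h1ins : rm1 = (ks.foldl (fun d k => d.insert k ([] : List Int)) PySem.Dict.empty).insert "no-domain_-1" [] :=
    PySem.Dict.setdefault_of_not_contains _ _ h0contains
  have h1items : rm1.items = ks.map (fun k => (k, ([] : List Int))) ++ [("no-domain_-1", [])] := by
    rw [h1ins, PySem.Dict.items_insert_of_not_contains _ _ h0contains, h0items]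
  have h1keys : rm1.keys = ks ++ ["no-domain_-1"] := by
    simp only [PySem.Dict.keys, h1items, List.map_append, List.map_map]
    simp [Function.comp_def]
  have h1nodup : (ks ++ ["no-domain_-1"]).Nodup := by
    rw [List.nodup_append]
    refine ⟨hnodup, by simp, ?_⟩
    intro a ha b hb
    simp at hb
    exact fun he => hsent ((he.trans hb) ▸ ha)
  -- rewrite the loop body
  have hbody : (fun (m : PySem.Dict String (List Int)) (r : Int) =>
      match (entries.foldl (fun d e => d.insert e.1 e.2) PySem.Dict.empty).items.find?
          (fun kv => kv.2.any (fun se => decide (se.1 ≤ r ∧ r ≤ se.2))) with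
      | some kv => m.modify kv.1 [] (· ++ [r])
      | none => m.modify "no-domain_-1" [] (· ++ [r]))
      = (fun m r => m.modify (pvOkey entries r) [] (· ++ [r])) := by
    funext m r
    rw [hdrd_items]
    simp only [pvOkey, pvHits]
    cases entries.find? (fun kv => kv.2.any (fun se => decide (se.1 ≤ r ∧ r ≤ se.2))) <;> rfl
  rw [hbody]
  -- keys of the result
  have hmem : ∀ x ∈ residues.map (pvOkey entries), x ∈ rm1.keys := by
    intro x hx
    rw [h1keys]
    obtain ⟨r, _, hr⟩ := List.mem_map.mp hx
    unfold pvOkey at hr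
    cases hf : entries.find? (fun kv => pvHits r kv.2) with
    | some kv =>
      rw [hf] at hr
      exact List.mem_append_left _ (hr ▸ List.mem_map_of_mem (List.mem_of_find?_eq_some hf))
    | none =>
      rw [hf] at hr
      exact List.mem_append_right _ (by simp [← hr])
  have hkeys : (residues.foldl (fun m r => m.modify (pvOkey entries r) [] (· ++ [r])) rm1).keys
      = ks ++ ["no-domain_-1"] := by
    have h := PySem.Dict.keys_foldl_modify_key residues (pvOkey entries) ([] : List Int)
      (fun _ r => (· ++ [r])) rm1
    rw [h, pvSetUpdate_of_mem _ _ hmem, h1keys]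
  -- lookups in the result
  have hgetD : ∀ c, (residues.foldl (fun m r => m.modify (pvOkey entries r) [] (· ++ [r])) rm1).getD c []
      = rm1.getD c [] ++ residues.filter (fun r => pvOkey entries r == c) := by
    intro c
    have e1 : (residues.map (fun r => (pvOkey entries r, r))).foldl
        (fun d p => d.modify p.1 [] (· ++ [p.2])) rm1
        = residues.foldl (fun m r => m.modify (pvOkey entries r) [] (· ++ [r])) rm1 :=
      List.foldl_map
    rw [← e1, PySem.Dict.getD_foldl_modify_append]
    congr 1
    rw [List.filter_map]
    rw [List.map_map]
    simp [Function.comp_def]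
  have h1getD : ∀ c ∈ ks ++ ["no-domain_-1"], rm1.getD c [] = [] := by
    intro c hc
    have hmemitems : (c, ([] : List Int)) ∈ rm1.items := by
      rw [h1items]
      rcases List.mem_append.mp hc with h | h
      · exact List.mem_append_left _ (List.mem_map_of_mem h)
      · simp at h
        simp [h]
    exact PySem.Dict.getD_of_mem_items _ hmemitems (by rw [h1keys]; exact h1nodup) []
  -- items of the result
  rw [PySem.Dict.items_eq_map_keys _ (by rw [hkeys]; exact h1nodup) ([] : List Int)]
  rw [hkeys, List.map_append]
  congr 1
  · apply List.map_congr_left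
    intro k hk
    rw [hgetD k, h1getD k (List.mem_append_left _ hk)]
    simp
  · simp only [List.map_cons, List.map_nil]
    rw [hgetD _, h1getD _ (by simp)]
    simp

-- ==== derived key facts ====
theorem pvKeysNodup (entries : List (String × List (Int × Int)))
    (hshape : ∀ j (_ : j < entries.length), ∃ dom,
      entries[j].1 = String.ofList (dom ++ '_' :: PySem.Int.toChars (j : Int))) :
    (entries.map (fun e => e.1)).Nodup := by
  rw [List.nodup_iff_injective_getElem]
  intro i1 i2 heq
  simp only [List.getElem_map] at heq
  have h1 : (i1 : Nat) < entries.length := by simpa using i1.isLt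
  have h2 : (i2 : Nat) < entries.length := by simpa using i2.isLt
  obtain ⟨d1, hd1⟩ := hshape i1 h1
  obtain ⟨d2, hd2⟩ := hshape i2 h2
  rw [hd1, hd2] at heq
  have := pvKey_inj (i := ((i1 : Nat) : Int)) (j := ((i2 : Nat) : Int)) (by omega) (by omega) heq
  have : (i1 : Nat) = (i2 : Nat) := by omega
  exact Fin.ext (by simpa using this)

theorem pvSentNotMem (entries : List (String × List (Int × Int)))
    (hshape : ∀ j (_ : j < entries.length), ∃ dom,
      entries[j].1 = String.ofList (dom ++ '_' :: PySem.Int.toChars (j : Int))) :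
    "no-domain_-1" ∉ entries.map (fun e => e.1) := by
  intro hm
  obtain ⟨j, hj, he⟩ := List.mem_iff_getElem.mp hm
  simp only [List.length_map] at hj
  rw [List.getElem_map] at he
  obtain ⟨dom, hd⟩ := hshape j hj
  rw [hd] at he
  exact pvKey_ne_sent (by omega) he

-- ==== B's groups in terms of pvOkey ====
theorem pvGroups_eq (entries : List (String × List (Int × Int))) (residues : List Int)
    (hnodup : (entries.map (fun e => e.1)).Nodup)
    (hsent : "no-domain_-1" ∉ entries.map (fun e => e.1)) :
    (PySem.List.enumerate entries).map
      (fun je => (je.2.1, residues.filter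
        (fun r => pvHits r je.2.2 &&
          !((PySem.List.slice entries none (some je.1)).any (fun e => pvHits r e.2)))))
    = (entries.map (fun e => e.1)).map
        (fun k => (k, residues.filter (fun r => pvOkey entries r == k))) := by
  apply List.ext_getElem
  · simp [PySem.List.length_enumerate]
  · intro j h1 h2
    have hj : j < entries.length := by
      simpa [PySem.List.length_enumerate] using h1
    simp only [List.getElem_map]
    rw [PySem.List.getElem_enumerate entries 0 j (by simpa [PySem.List.length_enumerate] using h1)]
    have hsl : PySem.List.slice entries none (some ((0 : Int) + (j : Nat))) = entries.take j := by
      rw [PySem.List.slice_to entries (by omega)]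
      norm_num
    simp only [hsl]
    congr 1
    apply List.filter_congr
    intro r _
    exact (pvOkey_key entries r j hj hnodup hsent).symm


-- ===== VERDICT (by name: the statement is the Claim_ definition above) =====
theorem check_domain_profile_spec : Claim_equal_check_domain_profile := by
  intro af rs pg _hdom hpre
  unfold Spec_check_domain_profile
  by_cases haf : af = [""]
  · simp [check_domain_profile, check_domain_profile_alt, haf]
  · have hwf : ∀ dp ∈ af, pvWF dp = true := hpre.resolve_left haf
    have hpa := pvParseAll_eq af hwf
    obtain ⟨_hlen, hshape⟩ := pvEntries_key_shape af hwf _ hpa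
    set entries := (PySem.List.enumerate af).map (fun p => (pvParseProfile p.1 p.2).getD ("", [])) with hent
    have hnodup := pvKeysNodup entries hshape
    have hsent := pvSentNotMem entries hshape
    have hun : rs.filter (fun r => pvOkey entries r == "no-domain_-1")
        = rs.filter (fun r => !(entries.any (fun e => pvHits r e.2))) :=
      List.filter_congr (fun r _ => pvOkey_sent entries r hsent)
    simp only [check_domain_profile, check_domain_profile_alt, if_neg haf, hpa]
    rw [pvRmItems entries rs hnodup hsent, pvGroups_eq entries rs hnodup hsent, hun]
    set X := (entries.map (fun e => e.1)).map (fun k => (k, rs.filter (fun r => pvOkey entries r == k))) with hX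
    set U := rs.filter (fun r => !(entries.any (fun e => pvHits r e.2))) with hUdef
    have hXsent : ∀ kv ∈ X, (kv.1 == "no-domain_-1") = false := by
      intro kv hkv
      obtain ⟨k, hk, he⟩ := List.mem_map.mp hkv
      rw [← he, beq_eq_false_iff_ne]
      exact fun hh => hsent (hh ▸ hk)
    have hA2 : (X ++ [("no-domain_-1", U)]).filter (fun kv => !kv.2.isEmpty && !(kv.1 == "no-domain_-1"))
        = X.filter (fun g => !g.2.isEmpty) := by
      rw [List.filter_append]
      rw [List.filter_congr (l := X) (fun kv hkv => by rw [hXsent kv hkv])]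
      simp
    have hA1 : (X ++ [("no-domain_-1", U)]).filter (fun kv => !kv.2.isEmpty)
        = X.filter (fun g => !g.2.isEmpty) ++ (if U.isEmpty then [] else [("no-domain_-1", U)]) := by
      rw [List.filter_append]
      congr 1
      cases hUe : U.isEmpty <;> simp [hUe]
    rw [hA1, hA2]
    by_cases hUe : U.isEmpty <;> simp [hUe]
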